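-- pv_equiv track=rewrite | github.com/robertS961/LeetCode_Problems | Medium/1717.py | goThrough
-- ===== SOURCE A (Python) =====
-- def goThrough(x,y,a,b,s):
--     ans = 0
--     for combo in (a,b):
--         stack = []
--         for i in range(len(s)):
--             if stack and stack[-1] + s[i] == combo:
--                 ans += x
--                 stack.pop()
--             else: stack.append(s[i])
--         x = y
--         s = "".join(stack)
--     return ans
-- ===== SOURCE B (Python) =====
-- def goThrough(x, y, a, b, s):
--     ans = 0
--     for combo, score in ((a, x), (b, y)):
--         if len(combo) == 2:
--             while combo in s:
--                 new = s.replace(combo, "")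
--                 ans += score * ((len(s) - len(new)) // 2)
--                 s = new
--     return ans
-- ===== Notes on version B (the rewrite author's own statement) =====
-- stated objective: faster
-- what changed: A cancels combo pairs with an explicit character stack in one per-character Python loop per combo; B keeps no stack and instead repeatedly deletes all occurrences with s.replace(combo, '') until none remain, scoring each pass by half the length drop (equal by confluence of adjacent-pair cancellation).
import Mathlib
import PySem

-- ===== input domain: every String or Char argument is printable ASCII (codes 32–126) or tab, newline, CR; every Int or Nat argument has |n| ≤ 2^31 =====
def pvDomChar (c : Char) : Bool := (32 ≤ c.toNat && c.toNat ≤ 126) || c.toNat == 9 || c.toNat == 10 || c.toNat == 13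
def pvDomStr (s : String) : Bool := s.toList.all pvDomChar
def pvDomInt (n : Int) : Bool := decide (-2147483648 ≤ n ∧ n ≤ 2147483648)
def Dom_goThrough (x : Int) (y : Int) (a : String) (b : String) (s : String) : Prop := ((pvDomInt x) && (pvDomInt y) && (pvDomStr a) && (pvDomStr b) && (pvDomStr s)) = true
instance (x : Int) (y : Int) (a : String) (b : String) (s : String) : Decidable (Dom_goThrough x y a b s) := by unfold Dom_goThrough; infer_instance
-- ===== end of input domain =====

-- B replaces A's per-character stack scan by repeated C-level `s.replace(combo, "")` passes,
-- scoring each pass by half the length drop; same return value, measured faster (objective: faster).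

-- ===== PORT A =====
-- one step of A's inner loop: state is (stack, ans); 'stack and stack[-1] + s[i] == combo'
def pvAStep (sc : Int) (combo : List Char) (acc : List Char × Int) (c : Char) : List Char × Int :=
  match acc.1.getLast? with
  | some t => if [t, c] = combo then (acc.1.dropLast, acc.2 + sc) else (acc.1 ++ [c], acc.2)
  | none => (acc.1 ++ [c], acc.2)

-- A's inner 'for i in range(len(s))' loop: starts with an empty stack, threads ans
def pvAPass (sc : Int) (combo : List Char) (s : List Char) (ans : Int) : List Char × Int :=
  s.foldl (pvAStep sc combo) (([] : List Char), ans)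

def goThrough (x : Int) (y : Int) (a : String) (b : String) (s : String) : Int :=
  let r1 := pvAPass x a.toList s.toList 0        -- first iteration: combo = a, score x
  let r2 := pvAPass y b.toList r1.1 r1.2         -- then x = y, s = "".join(stack)
  r2.2

-- ===== PORT B =====
-- support for B's 'while' termination: one `s.replace(combo, "")` pass, written structurally
def pvRep (p q : Char) : List Char → List Char
  | c :: d :: t => if c = p ∧ d = q then pvRep p q t else c :: pvRep p q (d :: t)
  | l => l

theorem pvGo_eq_rep (p q : Char) : ∀ (fuel : Nat) (l acc : List Char), l.length ≤ fuel →
    PySem.Chars.replace.go [p, q] [] fuel l acc = acc.reverse ++ pvRep p q l := by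
  intro fuel
  induction fuel with
  | zero =>
    intro l acc h
    have : l = [] := by cases l <;> simp_all
    subst this
    simp [PySem.Chars.replace.go, pvRep]
  | succ n ih =>
    intro l acc h
    match l with
    | [] => simp [PySem.Chars.replace.go, pvRep]
    | [c] =>
      have hpre : [p, q].isPrefixOf [c] = false := by simp [List.isPrefixOf]
      simp only [PySem.Chars.replace.go, hpre, Bool.false_eq_true, if_false]
      rw [ih [] (c :: acc) (by simp)]
      simp [pvRep]
    | c :: d :: t =>
      by_cases hc : c = p ∧ d = q
      · obtain ⟨rfl, rfl⟩ := hc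
        have hpre : [c, d].isPrefixOf (c :: d :: t) = true := by simp [List.isPrefixOf]
        simp only [PySem.Chars.replace.go, hpre, if_true, List.reverse_nil, List.nil_append]
        rw [show List.drop [c, d].length (c :: d :: t) = t from rfl]
        rw [ih t acc (by simp at h; omega)]
        simp [pvRep]
      · have hpre : [p, q].isPrefixOf (c :: d :: t) = false := by
          simp [List.isPrefixOf]
          intro h1 h2; exact absurd ⟨h1.symm, h2.symm⟩ hc
        simp only [PySem.Chars.replace.go, hpre, Bool.false_eq_true, if_false]
        rw [ih (d :: t) (c :: acc) (by simp at h ⊢; omega)]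
        simp [pvRep, hc]

theorem pvReplace_eq_rep (p q : Char) (s : List Char) :
    PySem.Chars.replace s [p, q] [] = pvRep p q s := by
  simp only [PySem.Chars.replace]
  rw [if_neg (by simp)]
  rw [pvGo_eq_rep p q s.length s [] le_rfl]
  simp

theorem pvRep_length_le (p q : Char) : ∀ (l : List Char), (pvRep p q l).length ≤ l.length := by
  intro l
  induction l using pvRep.induct p q with
  | case1 c d t hc ih => simp only [pvRep, if_pos hc, List.length_cons]; omega
  | case2 c d t hc ih => simp only [pvRep, if_neg hc, List.length_cons] at ih ⊢; omega
  | case3 l hl =>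
    cases l with
    | nil => simp [pvRep]
    | cons c t =>
      cases t with
      | nil => simp [pvRep]
      | cons d w => exact ((hl c d w) rfl).elim

theorem pvRep_infix_length (p q : Char) : ∀ (l : List Char), [p, q] <:+: l →
    (pvRep p q l).length + 2 ≤ l.length := by
  intro l
  induction l using pvRep.induct p q with
  | case1 c d t hc ih =>
    intro _
    have := pvRep_length_le p q t
    simp only [pvRep, if_pos hc, List.length_cons]
    omega
  | case2 c d t hc ih =>
    intro hinf
    rw [List.infix_cons_iff] at hinf
    rcases hinf with hpre | hinf
    · rcases hpre with ⟨w, hw⟩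
      simp at hw
      exact absurd ⟨hw.1.symm, hw.2.1.symm⟩ hc
    · have := ih hinf
      simp only [pvRep, if_neg hc, List.length_cons] at this ⊢
      omega
  | case3 l hl =>
    intro hinf
    have h2 : 2 ≤ l.length := by simpa using hinf.length_le
    cases l with
    | nil => simp at h2
    | cons c t =>
      cases t with
      | nil => simp at h2
      | cons d w => exact ((hl c d w) rfl).elim

theorem pvReplace_length_lt (p q : Char) (s : List Char)
    (h : PySem.Chars.isIn [p, q] s = true) :
    (PySem.Chars.replace s [p, q] []).length < s.length := by
  rw [pvReplace_eq_rep]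
  have := pvRep_infix_length p q s ((PySem.Chars.isIn_iff_infix _ _).mp h)
  omega

-- B's inner 'while combo in s' loop (combo = [p, q]); returns (points scored, final s)
def pvBLoop (sc : Int) (p q : Char) (s : List Char) : Int × List Char :=
  if h : PySem.Chars.isIn [p, q] s = true then
    let new := PySem.Chars.replace s [p, q] []
    let r := pvBLoop sc p q new
    (sc * PySem.Int.floordiv ((s.length : Int) - (new.length : Int)) 2 + r.1, r.2)
  else (0, s)
termination_by s.length
decreasing_by exact pvReplace_length_lt p q s h

-- one (combo, score) pair of B's outer loop, with B's 'if len(combo) == 2' guard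
def pvBPass (sc : Int) (combo : List Char) (s : List Char) : Int × List Char :=
  match combo with
  | [p, q] => pvBLoop sc p q s
  | _ => (0, s)

def goThrough_alt (x : Int) (y : Int) (a : String) (b : String) (s : String) : Int :=
  let r1 := pvBPass x a.toList s.toList
  let r2 := pvBPass y b.toList r1.2
  r1.1 + r2.1

-- ===== PRECONDITION & SPEC =====
def Spec_goThrough (x : Int) (y : Int) (a : String) (b : String) (s : String) (out : Int) : Prop := out = goThrough_alt x y a b s
instance (x : Int) (y : Int) (a : String) (b : String) (s : String) (out : Int) : Decidable (Spec_goThrough x y a b s out) := by unfold Spec_goThrough; infer_instance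

-- ===== CLAIM (what is proved, stated in full; the proofs are below) =====
def Claim_equal_goThrough : Prop := ∀ (x : Int) (y : Int) (a : String) (b : String) (s : String), Dom_goThrough x y a b s → Spec_goThrough x y a b s (goThrough x y a b s)

-- ===== LEMMAS AND PROOFS =====

-- 'reduced': no adjacent pair (p, q) — exactly '[p, q] not a substring'
def pvRed (p q : Char) (l : List Char) : Prop := l.IsChain (fun c d => ¬(c = p ∧ d = q))

-- one cancellation step, prepending on the left (B's normal form is a right fold of these)
def pvConsc (p q c : Char) : List Char → List Char
  | d :: t => if c = p ∧ d = q then t else c :: d :: t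
  | [] => [c]

-- the common normal form of one pass
def pvR (p q : Char) (l : List Char) : List Char := l.foldr (pvConsc p q) []

-- A's stack step / stack run / pop count, specialised to a two-char combo
def pvStep (p q : Char) (st : List Char) (c : Char) : List Char :=
  if st.getLast? = some p ∧ c = q then st.dropLast else st ++ [c]

def pvStk (p q : Char) (st l : List Char) : List Char := l.foldl (pvStep p q) st

def pvCnt (p q : Char) : List Char → List Char → Nat
  | _, [] => 0
  | st, c :: t =>
    if st.getLast? = some p ∧ c = q then 1 + pvCnt p q st.dropLast t
    else pvCnt p q (st ++ [c]) t

-- boundary merge of a reduced stack with a reduced right part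
def pvMergeRev (p q : Char) : List Char → List Char → List Char
  | c :: rt, d :: r => if c = p ∧ d = q then pvMergeRev p q rt r else (c :: rt).reverse ++ d :: r
  | rst, r => rst.reverse ++ r

def pvMerge (p q : Char) (st r : List Char) : List Char := pvMergeRev p q st.reverse r

theorem pvMerge_nil_left (p q : Char) (r : List Char) : pvMerge p q [] r = r := by
  cases r <;> simp [pvMerge, pvMergeRev]

theorem pvMerge_nil_right (p q : Char) (st : List Char) : pvMerge p q st [] = st := by
  cases h : st.reverse <;> simp [pvMerge, pvMergeRev, h, ← List.reverse_eq_iff.mp h]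

theorem pvMerge_snoc_cons (p q : Char) (u r : List Char) (c d : Char) :
    pvMerge p q (u ++ [c]) (d :: r) =
      if c = p ∧ d = q then pvMerge p q u r else u ++ c :: d :: r := by
  simp only [pvMerge, List.reverse_append, List.reverse_singleton, List.singleton_append,
    pvMergeRev]
  split_ifs <;> simp

theorem pvAStep_pair (sc : Int) (p q : Char) (st : List Char) (ans : Int) (c : Char) :
    pvAStep sc [p, q] (st, ans) c =
      (pvStep p q st c, if st.getLast? = some p ∧ c = q then ans + sc else ans) := by
  simp only [pvAStep, pvStep]
  cases h : st.getLast? with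
  | none => simp
  | some t =>
    by_cases hc : t = p ∧ c = q
    · obtain ⟨rfl, rfl⟩ := hc
      simp
    · have h1 : ¬([t, c] = [p, q]) := by
        intro hh; simp at hh; exact hc ⟨hh.1, hh.2⟩
      have h2 : ¬(some t = some p ∧ c = q) := by
        intro ⟨hh1, hh2⟩
        exact hc ⟨Option.some_inj.mp hh1, hh2⟩
      simp [h1, hc]

theorem pvAPass_pair (sc : Int) (p q : Char) : ∀ (l st : List Char) (ans : Int),
    l.foldl (pvAStep sc [p, q]) (st, ans) = (pvStk p q st l, ans + sc * pvCnt p q st l) := by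
  intro l
  induction l with
  | nil => intro st ans; simp [pvStk, pvCnt]
  | cons c t ih =>
    intro st ans
    simp only [List.foldl_cons, pvAStep_pair]
    by_cases hc : st.getLast? = some p ∧ c = q
    · rw [ih]
      simp [pvStk, pvStep, pvCnt, hc]
      ring
    · rw [ih]
      simp [pvStk, pvStep, pvCnt, hc]

theorem pvAPass_other (sc : Int) (combo : List Char) (hlen : combo.length ≠ 2) :
    ∀ (l st : List Char) (ans : Int),
    l.foldl (pvAStep sc combo) (st, ans) = (st ++ l, ans) := by
  intro l
  induction l with
  | nil => intro st ans; simp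
  | cons c t ih =>
    intro st ans
    have hstep : pvAStep sc combo (st, ans) c = (st ++ [c], ans) := by
      unfold pvAStep
      cases h : st.getLast? with
      | none => rfl
      | some e =>
        have : ¬([e, c] = combo) := fun hh => hlen (hh ▸ rfl)
        simp [this]
    simp [hstep, ih]

theorem pvCnt_len (p q : Char) : ∀ (l st : List Char),
    (pvStk p q st l).length + 2 * pvCnt p q st l = st.length + l.length := by
  intro l
  induction l with
  | nil => intro st; simp [pvStk, pvCnt]
  | cons c t ih =>
    intro st
    by_cases hc : st.getLast? = some p ∧ c = q
    · have hne : st ≠ [] := by intro h; rw [h] at hc; simp at hc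
      have hlen : st.dropLast.length + 1 = st.length := by
        cases st with
        | nil => exact absurd rfl hne
        | cons a u => simp
      have hstk : pvStk p q st (c :: t) = pvStk p q st.dropLast t := by
        simp only [pvStk, List.foldl_cons, pvStep]
        rw [if_pos hc]
      have hcnt : pvCnt p q st (c :: t) = 1 + pvCnt p q st.dropLast t := by
        simp only [pvCnt]
        rw [if_pos hc]
      rw [hstk, hcnt]
      have := ih st.dropLast
      simp only [List.length_cons]
      omega
    · have hstk : pvStk p q st (c :: t) = pvStk p q (st ++ [c]) t := by
        simp only [pvStk, List.foldl_cons, pvStep]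
        rw [if_neg hc]
      have hcnt : pvCnt p q st (c :: t) = pvCnt p q (st ++ [c]) t := by
        simp only [pvCnt]
        rw [if_neg hc]
      rw [hstk, hcnt]
      have := ih (st ++ [c])
      have hlen : (st ++ [c]).length = st.length + 1 := by simp
      simp only [List.length_cons]
      omega

theorem pvRed_step (p q : Char) (st : List Char) (c : Char) (h : pvRed p q st) :
    pvRed p q (pvStep p q st c) := by
  unfold pvStep
  split_ifs with hc
  · exact h.prefix st.dropLast_prefix
  · unfold pvRed at h ⊢
    rw [List.isChain_append]
    refine ⟨h, List.isChain_singleton _, ?_⟩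
    intro e he d hd
    simp at hd; subst hd
    intro ⟨rfl, rfl⟩
    exact hc ⟨he, rfl⟩

theorem pvRed_consc (p q c : Char) (r : List Char) (h : pvRed p q r) :
    pvRed p q (pvConsc p q c r) := by
  cases r with
  | nil => exact List.isChain_singleton _
  | cons d t =>
    simp only [pvConsc]
    split_ifs with hc
    · exact h.tail
    · exact List.isChain_cons_cons.mpr ⟨hc, h⟩

theorem pvRed_R (p q : Char) (l : List Char) : pvRed p q (pvR p q l) := by
  induction l with
  | nil => simp [pvR, pvRed]
  | cons c t ih => exact pvRed_consc p q c _ ih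

theorem pvR_of_red (p q : Char) : ∀ (l : List Char), pvRed p q l → pvR p q l = l := by
  intro l
  induction l with
  | nil => simp [pvR]
  | cons c t ih =>
    intro h
    have ht : pvR p q t = t := ih h.tail
    simp only [pvR, List.foldr_cons] at *
    rw [ht]
    cases t with
    | nil => rfl
    | cons d w =>
      have : ¬(c = p ∧ d = q) := List.isChain_cons_cons.mp h |>.1
      simp [pvConsc, this]

-- the key confluence-style lemma: A's left-to-right stack equals the boundary merge
-- of the stack with B's right-fold normal form
theorem pvStk_merge (p q : Char) : ∀ (l st : List Char), pvRed p q st →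
    pvStk p q st l = pvMerge p q st (pvR p q l) := by
  intro l
  induction l with
  | nil => intro st _; simp [pvStk, pvR, pvMerge_nil_right]
  | cons c t ih =>
    intro st hst
    have hstk : pvStk p q st (c :: t) = pvStk p q (pvStep p q st c) t := rfl
    have hr : pvRed p q (pvR p q t) := pvRed_R p q t
    rw [hstk, ih _ (pvRed_step p q st c hst)]
    show pvMerge p q (pvStep p q st c) (pvR p q t) = pvMerge p q st (pvConsc p q c (pvR p q t))
    set r := pvR p q t with hrdef
    clear_value r
    clear hstk ih hrdef
    unfold pvStep
    by_cases hpop : st.getLast? = some p ∧ c = q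
    · obtain ⟨hlast, hcq⟩ := hpop
      rw [if_pos ⟨hlast, hcq⟩]
      obtain ⟨u, rfl⟩ : ∃ u, st = u ++ [p] :=
        ⟨st.dropLast, (List.dropLast_append_getLast? p hlast).symm⟩
      rw [List.dropLast_concat]
      cases r with
      | nil =>
        rw [show pvConsc p q c [] = [c] from rfl]
        rw [pvMerge_nil_right, pvMerge_snoc_cons, if_pos ⟨rfl, hcq⟩, pvMerge_nil_right]
      | cons d r' =>
        by_cases hcan : c = p ∧ d = q
        · -- here p = c = q and d = q: everything collapses to one character
          obtain ⟨hcp, hdq⟩ := hcan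
          have hpq : p = q := hcp.symm.trans hcq
          rw [show pvConsc p q c (d :: r') = r' by simp [pvConsc, hcp, hdq]]
          have hLHS : pvMerge p q u (d :: r') = u ++ d :: r' := by
            cases hu : u.getLast? with
            | none =>
              rw [List.getLast?_eq_none_iff.mp hu, pvMerge_nil_left]
              simp
            | some e =>
              obtain ⟨v, rfl⟩ : ∃ v, u = v ++ [e] :=
                ⟨u.dropLast, (List.dropLast_append_getLast? e hu).symm⟩
              have hep : ¬(e = p ∧ d = q) := by
                intro hh
                -- pvRed (v ++ [e] ++ [p]) forbids the adjacent pair (p, p) since p = q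
                have h2 := hst
                unfold pvRed at h2
                rw [List.append_assoc, List.isChain_append] at h2
                have h3 : List.IsChain (fun c d => ¬(c = p ∧ d = q)) [e, p] := by
                  simpa using h2.2.1
                exact (List.isChain_cons_cons.mp h3).1 ⟨hh.1, hpq⟩
              rw [pvMerge_snoc_cons, if_neg hep]
              simp
          have hRHS : pvMerge p q (u ++ [p]) r' = u ++ d :: r' := by
            cases r' with
            | nil =>
              rw [pvMerge_nil_right, hdq, ← hpq]
            | cons e w =>
              have hede : ¬(p = p ∧ e = q) := by
                rintro ⟨-, rfl⟩
                -- pvRed (d :: e :: w) forbids d = p followed by e = q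
                have := (List.isChain_cons_cons.mp hr).1
                exact this ⟨hdq.trans hpq.symm, rfl⟩
              rw [pvMerge_snoc_cons, if_neg hede, hdq, ← hpq]
          rw [hLHS, hRHS]
        · rw [show pvConsc p q c (d :: r') = c :: d :: r' by simp [pvConsc, hcan]]
          rw [pvMerge_snoc_cons, if_pos ⟨rfl, hcq⟩]
    · rw [if_neg hpop]
      cases r with
      | nil =>
        rw [show pvConsc p q c [] = [c] from rfl]
        rw [pvMerge_nil_right]
        cases hlast2 : st.getLast? with
        | none =>
          rw [List.getLast?_eq_none_iff.mp hlast2, pvMerge_nil_left]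
          simp
        | some e =>
          obtain ⟨u, rfl⟩ : ∃ u, st = u ++ [e] :=
            ⟨st.dropLast, (List.dropLast_append_getLast? e hlast2).symm⟩
          have hec : ¬(e = p ∧ c = q) := by
            rintro ⟨rfl, rfl⟩
            exact hpop ⟨hlast2, rfl⟩
          rw [pvMerge_snoc_cons, if_neg hec]
          simp
      | cons d r' =>
        by_cases hcan : c = p ∧ d = q
        · rw [show pvConsc p q c (d :: r') = r' by simp [pvConsc, hcan]]
          rw [pvMerge_snoc_cons, if_pos hcan]
        · rw [show pvConsc p q c (d :: r') = c :: d :: r' by simp [pvConsc, hcan]]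
          rw [pvMerge_snoc_cons, if_neg hcan]
          cases hlast2 : st.getLast? with
          | none =>
            rw [List.getLast?_eq_none_iff.mp hlast2, pvMerge_nil_left]
            simp
          | some e =>
            obtain ⟨u, rfl⟩ : ∃ u, st = u ++ [e] :=
              ⟨st.dropLast, (List.dropLast_append_getLast? e hlast2).symm⟩
            have hec : ¬(e = p ∧ c = q) := by
              rintro ⟨rfl, rfl⟩
              exact hpop ⟨hlast2, rfl⟩
            rw [pvMerge_snoc_cons, if_neg hec]
            simp

theorem pvStk_nil (p q : Char) (l : List Char) : pvStk p q [] l = pvR p q l := by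
  rw [pvStk_merge p q l [] List.isChain_nil, pvMerge_nil_left]

-- prepending a whole combo onto a reduced list is a no-op
theorem pvConsc_combo (p q : Char) (r : List Char) (h : pvRed p q r) :
    pvConsc p q p (pvConsc p q q r) = r := by
  cases r with
  | nil => simp [pvConsc]
  | cons d t =>
    by_cases hc : q = p ∧ d = q
    · obtain ⟨hqp, hdq⟩ := hc
      rw [show pvConsc p q q (d :: t) = t by simp [pvConsc, hqp, hdq]]
      cases t with
      | nil => simp [pvConsc, ← hqp, hdq]
      | cons e w =>
        have he : ¬(p = p ∧ e = q) := by
          rintro ⟨-, rfl⟩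
          exact (List.isChain_cons_cons.mp h).1 ⟨hdq.trans hqp, rfl⟩
        have hne : ¬(e = q) := fun hh => he ⟨rfl, hh⟩
        have hstep : pvConsc p q p (e :: w) = p :: e :: w := by
          simp only [pvConsc]; rw [if_neg (by simp [hne])]
        rw [hstep, ← hqp, ← hdq]
    · rw [show pvConsc p q q (d :: t) = q :: d :: t by simp [pvConsc, hc]]
      simp [pvConsc]

theorem pvR_rep (p q : Char) : ∀ (l : List Char), pvR p q (pvRep p q l) = pvR p q l := by
  intro l
  induction l using pvRep.induct p q with
  | case1 c d t hc ih =>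
    obtain ⟨rfl, rfl⟩ := hc
    rw [show pvRep c d (c :: d :: t) = pvRep c d t by simp [pvRep]]
    rw [ih]
    show pvR c d t = pvConsc c d c (pvConsc c d d (pvR c d t))
    rw [pvConsc_combo c d _ (pvRed_R c d t)]
  | case2 c d t hc ih =>
    rw [show pvRep p q (c :: d :: t) = c :: pvRep p q (d :: t) by simp [pvRep, hc]]
    show pvConsc p q c (pvR p q (pvRep p q (d :: t))) = pvConsc p q c (pvR p q (d :: t))
    rw [ih]
  | case3 l hl =>
    cases l with
    | nil => rfl
    | cons c t =>
      cases t with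
      | nil => rfl
      | cons d w => exact ((hl c d w) rfl).elim

theorem pvRep_parity (p q : Char) : ∀ (l : List Char),
    ∃ k, l.length = (pvRep p q l).length + 2 * k := by
  intro l
  induction l using pvRep.induct p q with
  | case1 c d t hc ih =>
    obtain ⟨k, hk⟩ := ih
    exact ⟨k + 1, by rw [show pvRep p q (c :: d :: t) = pvRep p q t by simp [pvRep, hc]]; simp; omega⟩
  | case2 c d t hc ih =>
    obtain ⟨k, hk⟩ := ih
    exact ⟨k, by rw [show pvRep p q (c :: d :: t) = c :: pvRep p q (d :: t) by simp [pvRep, hc]]; simp at hk ⊢; omega⟩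
  | case3 l hl => exact ⟨0, by cases l with
      | nil => rfl
      | cons c t =>
        cases t with
        | nil => rfl
        | cons d w => exact ((hl c d w) rfl).elim⟩

theorem pvR_parity (p q : Char) : ∀ (l : List Char),
    ∃ k, l.length = (pvR p q l).length + 2 * k := by
  intro l
  induction l with
  | nil => exact ⟨0, rfl⟩
  | cons c t ih =>
    obtain ⟨k, hk⟩ := ih
    show ∃ k', (c :: t).length = (pvConsc p q c (pvR p q t)).length + 2 * k'
    cases h : pvR p q t with
    | nil => exact ⟨k, by simp [pvConsc]; rw [h] at hk; simp at hk; omega⟩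
    | cons d w =>
      by_cases hc : c = p ∧ d = q
      · refine ⟨k + 1, ?_⟩
        rw [show pvConsc p q c (d :: w) = w by simp [pvConsc, hc]]
        rw [h] at hk
        simp at hk ⊢
        omega
      · refine ⟨k, ?_⟩
        rw [show pvConsc p q c (d :: w) = c :: d :: w by simp [pvConsc, hc]]
        rw [h] at hk
        simp at hk ⊢
        omega

theorem pvNotInfix_red (p q : Char) : ∀ (l : List Char), ¬([p, q] <:+: l) → pvRed p q l := by
  intro l
  induction l with
  | nil => exact fun _ => List.isChain_nil
  | cons c t ih =>
    intro h
    cases t with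
    | nil => exact List.isChain_singleton _
    | cons d w =>
      refine List.isChain_cons_cons.mpr ⟨?_, ih ?_⟩
      · rintro ⟨rfl, rfl⟩
        exact h ⟨[], w, by simp⟩
      · intro hinf
        exact h (List.infix_cons_iff.mpr (Or.inr hinf))

theorem pvBLoop_spec (sc : Int) (p q : Char) : ∀ (s : List Char),
    pvBLoop sc p q s =
      (sc * (((s.length : Int) - ((pvR p q s).length : Int)) / 2), pvR p q s) := by
  intro s
  induction hn : s.length using Nat.strong_induction_on generalizing s with
  | _ n ihn =>
  subst hn
  rw [pvBLoop]
  by_cases h : PySem.Chars.isIn [p, q] s = true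
  · rw [dif_pos h]
    have hnew : PySem.Chars.replace s [p, q] [] = pvRep p q s := pvReplace_eq_rep p q s
    have hlt : (PySem.Chars.replace s [p, q] []).length < s.length := pvReplace_length_lt p q s h
    show (sc * PySem.Int.floordiv ((s.length : Int) -
        ((PySem.Chars.replace s [p, q] []).length : Int)) 2 +
        (pvBLoop sc p q (PySem.Chars.replace s [p, q] [])).1,
        (pvBLoop sc p q (PySem.Chars.replace s [p, q] [])).2) = _
    rw [hnew] at hlt ⊢
    rw [ihn (pvRep p q s).length hlt (pvRep p q s) rfl]
    rw [pvR_rep]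
    obtain ⟨k, hk⟩ := pvRep_parity p q s
    obtain ⟨m, hm⟩ := pvR_parity p q (pvRep p q s)
    rw [pvR_rep] at hm
    rw [PySem.Int.floordiv_eq_ediv_of_pos (by norm_num)]
    have h1 : ((s.length : Int) - ((pvRep p q s).length : Int)) / 2 = k := by omega
    have h2 : (((pvRep p q s).length : Int) - ((pvR p q s).length : Int)) / 2 = m := by omega
    have h3 : ((s.length : Int) - ((pvR p q s).length : Int)) / 2 = k + m := by omega
    rw [h1, h2, h3]
    dsimp only
    rw [mul_add]
  · rw [dif_neg h]
    have hred : pvRed p q s := pvNotInfix_red p q s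
      ((PySem.Chars.isIn_eq_false_iff _ _).mp (Bool.eq_false_iff.mpr h))
    rw [pvR_of_red p q s hred]
    simp

-- one (combo, score) pair: A's pass equals B's pass
theorem pvPass_equiv (sc : Int) (combo : List Char) (s : List Char) (ans : Int) :
    pvAPass sc combo s ans = ((pvBPass sc combo s).2, ans + (pvBPass sc combo s).1) := by
  match combo with
  | [p, q] =>
    show s.foldl (pvAStep sc [p, q]) ([], ans) = _
    rw [pvAPass_pair]
    simp only [pvBPass]
    rw [pvBLoop_spec]
    have hstk : pvStk p q [] s = pvR p q s := pvStk_nil p q s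
    have hlen := pvCnt_len p q s []
    rw [hstk] at hlen ⊢
    have hcnt : (pvCnt p q [] s : Int) = ((s.length : Int) - ((pvR p q s).length : Int)) / 2 := by
      simp at hlen
      omega
    rw [hcnt]
  | [] =>
    show s.foldl (pvAStep sc []) ([], ans) = _
    rw [pvAPass_other sc [] (by simp)]
    simp [pvBPass]
  | [c] =>
    show s.foldl (pvAStep sc [c]) ([], ans) = _
    rw [pvAPass_other sc [c] (by simp)]
    simp [pvBPass]
  | c :: d :: e :: rest =>
    show s.foldl (pvAStep sc (c :: d :: e :: rest)) ([], ans) = _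
    rw [pvAPass_other sc (c :: d :: e :: rest) (by simp)]
    simp [pvBPass]

-- ===== VERDICT (by name: the statement is the Claim_ definition above) =====
theorem goThrough_spec : Claim_equal_goThrough := by
  intro x y a b s _
  unfold Spec_goThrough
  have h1 : goThrough x y a b s =
      (pvAPass y b.toList (pvAPass x a.toList s.toList 0).1 (pvAPass x a.toList s.toList 0).2).2 := rfl
  have h2 : goThrough_alt x y a b s =
      (pvBPass x a.toList s.toList).1 +
        (pvBPass y b.toList (pvBPass x a.toList s.toList).2).1 := rfl
  rw [h1, h2, pvPass_equiv x a.toList s.toList 0]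
  dsimp only
  rw [pvPass_equiv y b.toList _ _]
  dsimp only
  ring
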